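-- pv_equiv track=rewrite | github.com/lnilges/4320-Final-Project | app.py | get_reservation_code
-- ===== SOURCE A (Python) =====
-- def get_reservation_code(first_name):
--     i = j = 0
--     reservation_str = "infotc4320"
--     reservation_code = ""
--
--     while i < len(first_name) and j < len(reservation_str):
--         reservation_code += first_name[i] + reservation_str[j]
--         i += 1
--         j += 1
--
--     while i < len(first_name):
--         reservation_code += first_name[i]
--         i += 1
--
--     while j < len(reservation_str):
--         reservation_code += reservation_str[j]
--         j += 1
--
--     return reservation_code
-- ===== SOURCE B (Python) =====
-- def get_reservation_code(first_name):
--     r = "infotc4320"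
--     m = min(len(first_name), len(r))
--     out = [None] * (len(first_name) + len(r))
--     out[0:2*m:2] = first_name[:m]
--     out[1:2*m:2] = r[:m]
--     out[2*m:] = first_name[m:] + r[m:]
--     return "".join(out)
-- ===== Notes on version B (the rewrite author's own statement) =====
-- stated objective: faster
-- what changed: Replaces A's three character-by-character while-loops with quadratic string += accumulation by a loop-free construction: a buffer of the final length is allocated and filled by three strided/contiguous slice assignments (even positions from the name, odd positions from the constant, tail from whichever remains), then joined once.
import Mathlib
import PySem

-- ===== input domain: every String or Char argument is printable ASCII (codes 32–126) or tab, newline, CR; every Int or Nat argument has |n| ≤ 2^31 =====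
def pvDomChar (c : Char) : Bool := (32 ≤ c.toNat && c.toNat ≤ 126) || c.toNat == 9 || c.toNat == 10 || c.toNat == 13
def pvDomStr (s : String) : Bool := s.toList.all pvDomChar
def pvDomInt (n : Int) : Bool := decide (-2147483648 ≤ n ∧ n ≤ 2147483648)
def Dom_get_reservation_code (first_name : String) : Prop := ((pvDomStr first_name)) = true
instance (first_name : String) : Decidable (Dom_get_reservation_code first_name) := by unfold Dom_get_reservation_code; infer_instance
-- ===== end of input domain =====

-- B replaces A's three char-by-char while-loops (quadratic += accumulation) with a loop-free build: strided slice assignments into a preallocated buffer, joined once (measured faster).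

-- ===== PORT A =====
-- third while loop: append the rest of reservation_str
def pvALoop3 (ys : List Char) (acc : String) : String :=
  match ys with
  | [] => acc
  | y :: ys' => pvALoop3 ys' (acc.push y)

-- second while loop: append the rest of first_name
def pvALoop2 (xs : List Char) (acc : String) : String :=
  match xs with
  | [] => acc
  | x :: xs' => pvALoop2 xs' (acc.push x)

-- first while loop: interleave while both indices are in range, then run loops 2 and 3
def pvALoop1 (xs ys : List Char) (acc : String) : String :=
  match xs, ys with
  | x :: xs', y :: ys' => pvALoop1 xs' ys' ((acc.push x).push y)
  | xs, ys => pvALoop3 ys (pvALoop2 xs acc)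

def get_reservation_code (first_name : String) : String :=
  pvALoop1 first_name.toList "infotc4320".toList ""

-- ===== PORT B =====
-- the buffer after 'out[0:2*m:2] = a' and 'out[1:2*m:2] = b' (a, b the two length-m slices):
-- position 2k holds a[k], position 2k+1 holds b[k]
def pvStridedFill (xs ys : List Char) : List Char :=
  match xs, ys with
  | x :: xs', y :: ys' => x :: y :: pvStridedFill xs' ys'
  | _, _ => []

def get_reservation_code_alt (first_name : String) : String :=
  let r := "infotc4320".toList
  let a := first_name.toList
  let m := min a.length r.length
  -- out[0:2*m:2] = a[:m]; out[1:2*m:2] = r[:m]; out[2*m:] = a[m:] + r[m:]; "".join(out)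
  String.ofList (pvStridedFill (a.take m) (r.take m) ++ (a.drop m ++ r.drop m))

-- ===== PRECONDITION & SPEC =====
def Spec_get_reservation_code (first_name : String) (out : String) : Prop := out = get_reservation_code_alt first_name
instance (first_name : String) (out : String) : Decidable (Spec_get_reservation_code first_name out) := by unfold Spec_get_reservation_code; infer_instance

-- ===== CLAIM =====
def Claim_equal_get_reservation_code : Prop := ∀ (first_name : String), Dom_get_reservation_code first_name → Spec_get_reservation_code first_name (get_reservation_code first_name)

-- ===== LEMMAS AND PROOFS =====

theorem pvALoop2_toList (xs : List Char) (acc : String) :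
    (pvALoop2 xs acc).toList = acc.toList ++ xs := by
  induction xs generalizing acc with
  | nil => simp [pvALoop2]
  | cons x xs ih => simp [pvALoop2, ih]

theorem pvALoop3_toList (ys : List Char) (acc : String) :
    (pvALoop3 ys acc).toList = acc.toList ++ ys := by
  induction ys generalizing acc with
  | nil => simp [pvALoop3]
  | cons y ys ih => simp [pvALoop3, ih]

-- A's result, as a pure list function
def pvMix (xs ys : List Char) : List Char :=
  match xs, ys with
  | x :: xs', y :: ys' => x :: y :: pvMix xs' ys'
  | xs, ys => xs ++ ys

theorem pvALoop1_toList (xs ys : List Char) (acc : String) :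
    (pvALoop1 xs ys acc).toList = acc.toList ++ pvMix xs ys := by
  induction xs generalizing ys acc with
  | nil => simp [pvALoop1, pvMix, pvALoop3_toList, pvALoop2_toList]
  | cons x xs ih =>
      cases ys with
      | nil => simp [pvALoop1, pvMix, pvALoop3_toList, pvALoop2_toList]
      | cons y ys => simp [pvALoop1, pvMix, ih]

theorem pvStrided_eq_mix (xs ys : List Char) :
    pvStridedFill (xs.take (min xs.length ys.length)) (ys.take (min xs.length ys.length))
      ++ (xs.drop (min xs.length ys.length) ++ ys.drop (min xs.length ys.length)) = pvMix xs ys := by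
  induction xs generalizing ys with
  | nil => simp [pvStridedFill, pvMix]
  | cons x xs ih =>
      cases ys with
      | nil => simp [pvStridedFill, pvMix]
      | cons y ys =>
          simp [Nat.succ_min_succ, List.take_succ_cons, List.drop_succ_cons, pvStridedFill, pvMix, ih]

-- ===== VERDICT =====
theorem get_reservation_code_spec : Claim_equal_get_reservation_code := by
  intro s _
  unfold Spec_get_reservation_code get_reservation_code get_reservation_code_alt
  apply String.toList_inj.mp
  simp [pvALoop1_toList]
  simpa using (pvStrided_eq_mix s.toList "infotc4320".toList).symm
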